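-- pv_equiv track=rewrite | github.com/Rcheng0731/DynaST-seq | Matrix_generation/Consensus_sequence_construction.py | parse_md_tag
-- ===== SOURCE A (Python) =====
-- def parse_md_tag(md_tag):
--     mismatches = []
--     position = 0
--     number = ''
--
--     i = 0
--     while i < len(md_tag):
--         char = md_tag[i]
--
--         if char.isdigit():
--             number += char
--         else:
--             if number:
--                 position += int(number)
--                 number = ''
--
--             if char == '^':
--                 i += 1
--                 insert_seq = ''
--                 while i < len(md_tag) and md_tag[i] in 'ACGT':
--                     insert_seq += md_tag[i]
--                     i += 1
--                 continue
--
--             mismatches.append((position, char))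
--             position += 1
--
--         i += 1
--
--     if number:
--         position += int(number)
--
--     return mismatches
-- ===== SOURCE B (Python) =====
-- import re
--
-- _MD_TOKEN = re.compile(r'\d+|\^[ACGT]*|[^\d^]')
--
-- def parse_md_tag(md_tag):
--     mismatches = []
--     position = 0
--     for m in _MD_TOKEN.finditer(md_tag):
--         t = m.group()
--         if t[0].isdigit():
--             position += int(t)
--         elif t[0] == '^':
--             pass  # deletion: no position advance
--         else:
--             mismatches.append((position, t))
--             position += 1
--     return mismatches
-- ===== Notes on version B (the rewrite author's own statement) =====
-- stated objective: idiomatic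
-- what changed: Replaced A's char-by-char index/while state machine (manual digit accumulator and inner caret-skipping while loop) with a regex tokenizer (digit run, or caret plus ACGT run, or one other char) followed by a single pass over the tokens maintaining a running position.
import Mathlib
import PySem

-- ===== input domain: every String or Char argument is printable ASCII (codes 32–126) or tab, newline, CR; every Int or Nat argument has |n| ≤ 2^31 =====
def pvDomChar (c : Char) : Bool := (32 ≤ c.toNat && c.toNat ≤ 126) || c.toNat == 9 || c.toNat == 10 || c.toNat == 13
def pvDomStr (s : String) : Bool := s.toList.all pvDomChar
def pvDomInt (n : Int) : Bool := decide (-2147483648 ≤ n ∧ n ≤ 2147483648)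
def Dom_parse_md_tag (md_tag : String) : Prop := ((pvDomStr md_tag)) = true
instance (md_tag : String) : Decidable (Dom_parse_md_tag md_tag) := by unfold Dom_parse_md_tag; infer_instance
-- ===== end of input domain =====

-- B replaces A's char-by-char index/while state machine with a regex-style tokenizer
-- (digit run | '^'+ACGT run | single char) followed by one pass over the tokens (idiomatic; same cost).

-- shared helper: Python's int(...) on a non-empty ASCII digit string
def intOfDigits (ds : List Char) : Int :=
  ds.foldl (fun a c => a * 10 + ((c.toNat : Int) - 48)) 0

-- membership test `c in 'ACGT'`
def isACGT (c : Char) : Bool := c = 'A' || c = 'C' || c = 'G' || c = 'T'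

-- ===== PORT A =====
-- outer while loop (goA) with the accumulated `number`, and the inner `^`-skipping while loop (skipA)
mutual
def goA : List Char → List (Int × String) → Int → List Char → List (Int × String)
  | [], acc, _, _ => acc          -- trailing `if number:` only updates the unused position
  | c :: rest, acc, pos, num =>
    if c.isDigit then goA rest acc pos (num ++ [c])
    else
      let pos' := if num.isEmpty then pos else pos + intOfDigits num
      if c = '^' then skipA rest acc pos'
      else goA rest (acc ++ [(pos', String.mk [c])]) (pos' + 1) []
  termination_by cs _ _ _ => (cs.length, 0)
def skipA : List Char → List (Int × String) → Int → List (Int × String)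
  | [], acc, _ => acc
  | c :: rest, acc, pos =>
    if isACGT c then skipA rest acc pos else goA (c :: rest) acc pos []
  termination_by cs _ _ => (cs.length, 1)
end

def parse_md_tag (md_tag : String) : List (Int × String) :=
  goA md_tag.toList [] 0 []

-- ===== PORT B =====
-- hand port of the regex r'\d+|\^[ACGT]*|[^\d^]' : tokenize left to right
def tokB : List Char → List (List Char)
  | [] => []
  | c :: rest =>
    if c.isDigit then
      (c :: rest.takeWhile Char.isDigit) :: tokB (rest.dropWhile Char.isDigit)
    else if c = '^' then
      (c :: rest.takeWhile isACGT) :: tokB (rest.dropWhile isACGT)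
    else
      [c] :: tokB rest
termination_by cs => cs.length
decreasing_by
  · exact Nat.lt_succ_of_le (List.length_dropWhile_le _ _)
  · exact Nat.lt_succ_of_le (List.length_dropWhile_le _ _)
  · exact Nat.lt_succ_self _

-- one pass over the tokens, threading (mismatches, position)
def stepB (st : List (Int × String) × Int) (t : List Char) : List (Int × String) × Int :=
  match t with
  | [] => st
  | c :: _ =>
    if c.isDigit then (st.1, st.2 + intOfDigits t)
    else if c = '^' then st
    else (st.1 ++ [(st.2, String.mk t)], st.2 + 1)

def parse_md_tag_alt (md_tag : String) : List (Int × String) :=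
  ((tokB md_tag.toList).foldl stepB ([], 0)).1

-- ===== PRECONDITION & SPEC =====
def Spec_parse_md_tag (md_tag : String) (out : List (Int × String)) : Prop := out = parse_md_tag_alt md_tag
instance (md_tag : String) (out : List (Int × String)) : Decidable (Spec_parse_md_tag md_tag out) := by unfold Spec_parse_md_tag; infer_instance

-- ===== CLAIM (what is proved, stated in full; the proofs are below) =====
def Claim_equal_parse_md_tag : Prop := ∀ (md_tag : String), Dom_parse_md_tag md_tag → Spec_parse_md_tag md_tag (parse_md_tag md_tag)

-- ===== LEMMAS AND PROOFS =====

-- digit-run flushing: accumulating digits one by one and flushing equals flushing the whole run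
theorem goA_digits (rest : List Char) : ∀ acc pos num, num ≠ [] →
    goA rest acc pos num
      = goA (rest.dropWhile Char.isDigit) acc
          (pos + intOfDigits (num ++ rest.takeWhile Char.isDigit)) [] := by
  induction rest with
  | nil => intro acc pos num h; simp [goA]
  | cons c r ih =>
    intro acc pos num h
    by_cases hd : c.isDigit
    · rw [show goA (c :: r) acc pos num = goA r acc pos (num ++ [c]) by simp [goA, hd]]
      rw [ih acc pos (num ++ [c]) (by simp)]
      simp [hd]
    · have hne : num.isEmpty = false := by
        cases num with | nil => exact absurd rfl h | cons a b => rfl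
      simp only [List.takeWhile_cons, List.dropWhile_cons, hd, if_neg, Bool.false_eq_true,
        not_false_eq_true]
      simp [goA, hd, hne]

-- the inner `^` while loop skips the ACGT run
theorem skipA_drop (rest : List Char) : ∀ acc pos,
    skipA rest acc pos = goA (rest.dropWhile isACGT) acc pos [] := by
  induction rest with
  | nil => intro acc pos; simp [skipA, goA]
  | cons c r ih =>
    intro acc pos
    by_cases hg : isACGT c
    · simp [skipA, hg, ih]
    · simp [skipA, hg]

-- main invariant: A's state machine equals B's token fold
theorem main_lemma : ∀ (n : Nat) (cs : List Char), cs.length ≤ n → ∀ acc pos,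
    goA cs acc pos [] = ((tokB cs).foldl stepB (acc, pos)).1 := by
  intro n
  induction n with
  | zero =>
    intro cs hlen acc pos
    have : cs = [] := List.eq_nil_of_length_eq_zero (Nat.le_zero.mp hlen)
    subst this; simp [goA, tokB]
  | succ n ih =>
    intro cs hlen acc pos
    match cs with
    | [] => simp [goA, tokB]
    | c :: rest =>
      have hr : rest.length ≤ n := Nat.le_of_succ_le_succ hlen
      by_cases hd : c.isDigit
      · rw [show goA (c :: rest) acc pos [] = goA rest acc pos [c] by simp [goA, hd]]
        rw [goA_digits rest acc pos [c] (by simp)]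
        rw [ih (rest.dropWhile Char.isDigit)
          (Nat.le_trans (List.length_dropWhile_le _ _) hr)]
        simp [tokB, hd, stepB, List.foldl_cons]
      · by_cases hc : c = '^'
        · subst hc
          rw [show goA ('^' :: rest) acc pos [] = skipA rest acc pos by simp [goA, hd]]
          rw [skipA_drop rest acc pos]
          rw [ih (rest.dropWhile isACGT)
            (Nat.le_trans (List.length_dropWhile_le _ _) hr)]
          simp [tokB, hd, stepB, List.foldl_cons]
        · rw [show goA (c :: rest) acc pos []
              = goA rest (acc ++ [(pos, String.mk [c])]) (pos + 1) [] by
            simp [goA, hd, hc]]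
          rw [ih rest hr]
          simp [tokB, hd, hc, stepB, List.foldl_cons]

-- ===== VERDICT (by name: the statement is the Claim_ definition above) =====
theorem parse_md_tag_spec : Claim_equal_parse_md_tag := by
  intro md_tag _
  unfold Spec_parse_md_tag parse_md_tag parse_md_tag_alt
  exact main_lemma md_tag.toList.length md_tag.toList (Nat.le_refl _) [] 0
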